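-- pv_equiv track=rewrite | github.com/PreludeAndFugue/AdventOfCode | 2018/python/day02.py | part1
-- ===== SOURCE A (Python) =====
-- from collections import Counter
--
-- def part1(items):
--     two_count = 0
--     three_count = 0
--     for item in items:
--         count = Counter(item)
--         values = set(count.values())
--         if 2 in values:
--             two_count += 1
--         if 3 in values:
--             three_count += 1
--
--     return two_count * three_count
-- ===== SOURCE B (Python) =====
-- def run_lengths(chars):
--     # chars is sorted; return the lengths of its maximal runs of equal elements
--     if not chars:
--         return []
--     c = chars[0]
--     rest = chars[1:]
--     i = 0
--     while i < len(rest) and rest[i] == c: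
--         i += 1
--     return [i + 1] + run_lengths(rest[i:])
--
-- def part1(items):
--     two_count = sum(1 for item in items if 2 in run_lengths(sorted(item)))
--     three_count = sum(1 for item in items if 3 in run_lengths(sorted(item)))
--     return two_count * three_count
-- ===== Notes on version B (the rewrite author's own statement) =====
-- stated objective: alternative
-- what changed: Replaces the Counter hash tally and set-of-values per item with sorting each item's characters and recursively collecting the lengths of consecutive equal runs, and splits the single two-counter loop into two independent counting passes multiplied at the end.
import Mathlib
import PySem

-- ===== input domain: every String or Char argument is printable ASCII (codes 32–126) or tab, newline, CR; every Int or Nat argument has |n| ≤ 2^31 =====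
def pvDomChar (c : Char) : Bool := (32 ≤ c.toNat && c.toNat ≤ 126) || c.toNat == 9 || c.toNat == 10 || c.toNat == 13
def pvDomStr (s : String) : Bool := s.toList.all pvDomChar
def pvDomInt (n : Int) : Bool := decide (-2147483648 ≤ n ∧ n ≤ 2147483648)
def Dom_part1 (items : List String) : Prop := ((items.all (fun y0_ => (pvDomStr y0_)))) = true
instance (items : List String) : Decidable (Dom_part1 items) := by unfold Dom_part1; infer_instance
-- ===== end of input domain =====

-- B replaces A's per-item Counter/set-of-values tally with sort + consecutive-run lengths (alternative decomposition, not claimed faster).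

-- ===== PORT A =====
def part1 (items : List String) : Int :=
  let r := items.foldl (fun (tc : Int × Int) item =>
    let count := PySem.Dict.counter item.toList
    let values : PySem.Set Int := PySem.Set.ofList count.values
    let tc1 := if values.contains 2 then (tc.1 + 1, tc.2) else tc
    if values.contains 3 then (tc1.1, tc1.2 + 1) else tc1) ((0 : Int), (0 : Int))
  r.1 * r.2

-- ===== PORT B =====
-- run_lengths: 'i' advances over the prefix of rest equal to c (the while loop) = takeWhile;
-- rest[i:] = dropWhile; the recursion is Source B's recursion.
def runLens (chars : List Char) : List Int :=
  match chars with
  | [] => []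
  | c :: rest =>
    (((rest.takeWhile (fun x => x == c)).length : Int) + 1) ::
      runLens (rest.dropWhile (fun x => x == c))
termination_by chars.length
decreasing_by
  simpa using Nat.lt_succ_of_le (List.length_dropWhile_le _ _)

def part1_alt (items : List String) : Int :=
  let two_count := items.foldl
    (fun acc item => if (runLens (PySem.List.sorted item.toList (fun x => x) false)).contains 2 then acc + 1 else acc) (0 : Int)
  let three_count := items.foldl
    (fun acc item => if (runLens (PySem.List.sorted item.toList (fun x => x) false)).contains 3 then acc + 1 else acc) (0 : Int)
  two_count * three_count

-- ===== PRECONDITION & SPEC =====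
def Spec_part1 (items : List String) (out : Int) : Prop := out = part1_alt items
instance (items : List String) (out : Int) : Decidable (Spec_part1 items out) := by unfold Spec_part1; infer_instance

-- ===== CLAIM (what is proved, stated in full; the proofs are below) =====
def Claim_equal_part1 : Prop := ∀ (items : List String), Dom_part1 items → Spec_part1 items (part1 items)

-- ===== LEMMAS AND PROOFS =====

-- run lengths of a sorted list are exactly the multiplicities of its elements
theorem mem_runLens_sorted (l : List Char) (h : l.Pairwise (· ≤ ·)) (k : Int) :
    k ∈ runLens l ↔ ∃ c ∈ l, (l.count c : Int) = k := by
  induction l using runLens.induct with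
  | case1 => simp [runLens]
  | case2 c rest ih =>
    set t := rest.takeWhile (fun x => x == c) with ht
    set d := rest.dropWhile (fun x => x == c) with hd
    have hrest : t ++ d = rest := List.takeWhile_append_dropWhile
    have htc : ∀ x ∈ t, x = c := fun x hx => by
      simpa using List.mem_takeWhile_imp hx
    have hcrest : ∀ x ∈ rest, c ≤ x := (List.pairwise_cons.mp h).1
    have hdp : d.Pairwise (· ≤ ·) :=
      ((List.pairwise_cons.mp h).2.sublist (List.dropWhile_sublist _))
    have hdgt : ∀ x ∈ d, c < x := by
      rcases he : d with _ | ⟨d0, d'⟩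
      · simp
      · have hd0 : ¬ (d0 == c) = true := by
          have := List.head_dropWhile_not (fun x => x == c) (l := rest)
          rw [← hd, he] at this; simpa using this (by simp)
        have hd0c : c < d0 := by
          have : c ≤ d0 := hcrest d0 (by rw [← hrest]; simp [he])
          rcases lt_or_eq_of_le this with h' | h'
          · exact h'
          · exact absurd (by simp [h']) hd0
        intro x hx
        rcases List.mem_cons.mp hx with rfl | hx
        · exact hd0c
        · have : d0 ≤ x := by
            rw [he] at hdp
            exact (List.pairwise_cons.mp hdp).1 x hx
          exact lt_of_lt_of_le hd0c this
    have hcnotd : c ∉ d := fun hc => absurd rfl (ne_of_gt (hdgt c hc))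
    have hcountc : (c :: rest).count c = t.length + 1 := by
      rw [← hrest]
      have h1 : t.count c = t.length := List.count_eq_length.mpr (fun b hb => ((htc b hb).symm))
      have h2 : d.count c = 0 := List.count_eq_zero.mpr hcnotd
      simp [List.count_append, h1, h2]
    have hcountd : ∀ c' ∈ d, (c :: rest).count c' = d.count c' := by
      intro c' hc'
      have hne : c' ≠ c := ne_of_gt (hdgt c' hc')
      have hnt : c' ∉ t := fun hmem => hne (htc c' hmem)
      rw [← hrest]
      simp only [List.count_cons, List.count_append, List.count_eq_zero.mpr hnt]
      simp
      exact fun hh => hne hh.symm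
    rw [runLens]
    simp only [List.mem_cons, ← ht, ← hd]
    rw [ih hdp]
    constructor
    · rintro (rfl | ⟨c', hc', hcnt⟩)
      · exact ⟨c, by simp, by rw [hcountc]; push_cast; ring⟩
      · exact ⟨c', by rw [← hrest]; simp [hc'], by rw [hcountd c' hc']; exact hcnt⟩
    · rintro ⟨c', hc', hcnt⟩
      rcases hc' with rfl | hc'
      · left; rw [hcountc] at hcnt; push_cast at hcnt ⊢; omega
      · rw [← hrest, List.mem_append] at hc'
        rcases hc' with hc' | hc'
        · left
          have := htc c' hc'; subst this
          rw [hcountc] at hcnt; push_cast at hcnt ⊢; omega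
        · right; exact ⟨c', hc', by rw [← hcountd c' hc']; exact hcnt⟩

-- the per-item conditions of A and B agree
theorem cond_eq (item : String) (k : Int) :
    (PySem.Set.ofList (PySem.Dict.counter item.toList).values).contains k
      = (runLens (PySem.List.sorted item.toList (fun x => x) false)).contains k := by
  have hvals : (PySem.Dict.counter item.toList).values
      = (PySem.Set.ofList item.toList).map (fun c => (item.toList.count c : Int)) := by
    show (PySem.Dict.counter item.toList).items.map Prod.snd = _
    rw [PySem.Dict.items_counter]; simp
  have hperm : (PySem.List.sorted item.toList (fun x => x) false).Perm item.toList :=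
    PySem.List.sorted_perm _ _ _
  have hpw : (PySem.List.sorted item.toList (fun x => x) false).Pairwise (· ≤ ·) := by
    simpa using PySem.List.sorted_pairwise (xs := item.toList) (key := fun x => x)
  rw [Bool.eq_iff_iff]
  rw [PySem.Set.contains_iff, hvals]
  simp only [List.contains_iff_mem]
  rw [mem_runLens_sorted _ hpw k]
  simp only [PySem.Set.mem_ofList, List.mem_map]
  constructor
  · rintro ⟨c, ⟨hc, rfl⟩⟩
    exact ⟨c, hperm.mem_iff.mpr hc, by rw [hperm.count_eq]⟩
  · rintro ⟨c, hc, hcnt⟩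
    exact ⟨c, hperm.mem_iff.mp hc, by rw [hperm.count_eq] at hcnt; exact hcnt⟩

-- the A-fold computes the pair of B's two folds
theorem fold_pair (items : List String) (a b : Int) :
    items.foldl (fun (tc : Int × Int) item =>
      let count := PySem.Dict.counter item.toList
      let values : PySem.Set Int := PySem.Set.ofList count.values
      let tc1 := if values.contains 2 then (tc.1 + 1, tc.2) else tc
      if values.contains 3 then (tc1.1, tc1.2 + 1) else tc1) (a, b)
    = (items.foldl (fun acc item =>
        if (runLens (PySem.List.sorted item.toList (fun x => x) false)).contains 2 then acc + 1 else acc) a,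
       items.foldl (fun acc item =>
        if (runLens (PySem.List.sorted item.toList (fun x => x) false)).contains 3 then acc + 1 else acc) b) := by
  induction items generalizing a b with
  | nil => rfl
  | cons item rest ih =>
    simp only [List.foldl_cons]
    have h2 := cond_eq item 2
    have h3 := cond_eq item 3
    cases hb2 : (runLens (PySem.List.sorted item.toList (fun x => x) false)).contains 2 <;>
      cases hb3 : (runLens (PySem.List.sorted item.toList (fun x => x) false)).contains 3 <;>
      · simp only [h2, h3, hb2, hb3, Bool.false_eq_true, if_false, if_true]
        exact ih _ _

-- ===== VERDICT (by name: the statement is the Claim_ definition above) =====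
theorem part1_spec : Claim_equal_part1 := by
  intro items _
  unfold Spec_part1 part1 part1_alt
  rw [fold_pair]
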